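-- pv_equiv track=rewrite | github.com/DARPA-AIxCC/Cyber-Reasoning-System | crs/src/orchestrator/valkyrie/app/distance.py | coverage_distance
-- ===== SOURCE A (Python) =====
-- def coverage_distance(patched_list, original_list):
--     distance_info = dict()
--     for t_id in patched_list:
--         distance = 0
--         orig_coverage = original_list[t_id]
--         patched_coverage = patched_list[t_id]
--         edges = list(set(list(orig_coverage.keys()) + list(patched_coverage.keys())))
--         for edge in edges:
--             if edge in patched_coverage.keys():
--                 if edge not in orig_coverage.keys():
--                     distance += int(patched_coverage[edge])
--                 else:
--                     distance += abs(
--                         int(patched_coverage[edge]) - int(orig_coverage[edge])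
--                     )
--             else:
--                 distance += int(orig_coverage[edge])
--         distance_info[t_id] = distance
--     return distance_info
-- ===== SOURCE B (Python) =====
-- def coverage_distance(patched_list, original_list):
--     distance_info = {}
--     for t_id, patched_coverage in patched_list.items():
--         orig_coverage = original_list[t_id]
--         ps = sorted(patched_coverage.items(), key=lambda e: e[0])
--         qs = sorted(orig_coverage.items(), key=lambda e: e[0])
--         i = j = 0
--         distance = 0
--         while i < len(ps) and j < len(qs):
--             if ps[i][0] == qs[j][0]:
--                 distance += abs(int(ps[i][1]) - int(qs[j][1]))
--                 i += 1
--                 j += 1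
--             elif ps[i][0] < qs[j][0]:
--                 distance += int(ps[i][1])
--                 i += 1
--             else:
--                 distance += int(qs[j][1])
--                 j += 1
--         while i < len(ps):
--             distance += int(ps[i][1])
--             i += 1
--         while j < len(qs):
--             distance += int(qs[j][1])
--             j += 1
--         distance_info[t_id] = distance
--     return distance_info
-- ===== Notes on version B (the rewrite author's own statement) =====
-- stated objective: alternative
-- what changed: B replaces A's hash-set union with membership tests by sorting each test's two coverage item lists by edge key and computing the distance with a two-pointer sorted-merge scan (equal keys: abs difference; a key present on one side only: its raw value).
import Mathlib
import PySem

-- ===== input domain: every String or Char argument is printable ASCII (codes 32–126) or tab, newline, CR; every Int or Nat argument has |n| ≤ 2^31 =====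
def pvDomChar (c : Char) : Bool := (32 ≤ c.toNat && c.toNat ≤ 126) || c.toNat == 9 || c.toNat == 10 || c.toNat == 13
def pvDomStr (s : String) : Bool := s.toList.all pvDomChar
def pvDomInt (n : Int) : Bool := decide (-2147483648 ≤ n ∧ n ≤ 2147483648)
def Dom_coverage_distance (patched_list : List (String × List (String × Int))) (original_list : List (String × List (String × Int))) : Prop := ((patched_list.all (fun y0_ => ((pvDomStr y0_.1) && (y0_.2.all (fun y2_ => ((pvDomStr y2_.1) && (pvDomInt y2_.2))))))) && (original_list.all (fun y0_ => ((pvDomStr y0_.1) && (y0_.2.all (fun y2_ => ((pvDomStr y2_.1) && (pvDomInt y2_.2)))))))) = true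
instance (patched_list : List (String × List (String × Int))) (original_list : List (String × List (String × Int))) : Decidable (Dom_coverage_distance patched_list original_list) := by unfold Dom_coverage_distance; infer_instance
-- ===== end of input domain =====

-- B replaces A's union-set pass by sorting each test's two item lists by edge key and merging them with a two-pointer scan; equivalence of the return value is proved on Pre_ (every patched test id present in original_list, where Python A does not raise KeyError).


-- ===== PORT A =====
-- shared input decoding: both Pythons receive dict-of-dict arguments; the assoc lists are folded
-- into PySem.Dict exactly as Python's dict() merges them (overwrite keeps position, new keys append)
def pvDictOf (l : List (String × List (String × Int))) : PySem.Dict String (PySem.Dict String Int) :=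
  PySem.Dict.ofList (l.map (fun p => (p.1, PySem.Dict.ofList p.2)))

-- inner loop of A: edges = list(set(orig.keys + patched.keys)); summing over the set is
-- iteration-order independent (Int addition commutes), so PySem.Set's first-insertion order is exact
def covDistA (pc oc : PySem.Dict String Int) : Int :=
  (PySem.Set.ofList (oc.keys ++ pc.keys)).foldl (fun distance edge =>
    if pc.contains edge then
      if !(oc.contains edge) then distance + pc.getD edge 0
      else distance + |pc.getD edge 0 - oc.getD edge 0|
    else distance + oc.getD edge 0) 0

-- outside Pre_ Python A raises KeyError on original_list[t_id]; the port reads the empty dict there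
def coverage_distance (patched_list : List (String × List (String × Int))) (original_list : List (String × List (String × Int))) : List (String × Int) :=
  ((pvDictOf patched_list).keys.foldl (fun distance_info t_id =>
      distance_info.insert t_id
        (covDistA ((pvDictOf patched_list).getD t_id PySem.Dict.empty)
          ((pvDictOf original_list).getD t_id PySem.Dict.empty)))
    PySem.Dict.empty).items

-- ===== PORT B =====
-- B's three while loops: two-pointer merge of the two key-sorted item lists, then the two drains
def mergeDist : List (String × Int) → List (String × Int) → Int → Int
  | [], qs, acc => qs.foldl (fun distance e => distance + e.2) acc
  | p :: ps, [], acc => (p :: ps).foldl (fun distance e => distance + e.2) acc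
  | p :: ps, q :: qs, acc =>
    if p.1 = q.1 then mergeDist ps qs (acc + |p.2 - q.2|)
    else if p.1 < q.1 then mergeDist ps (q :: qs) (acc + p.2)
    else mergeDist (p :: ps) qs (acc + q.2)
termination_by ps qs _ => ps.length + qs.length

-- inner part of B: ps = sorted(pc.items(), key=fst); qs = sorted(oc.items(), key=fst); merge
def covDistB (pc oc : PySem.Dict String Int) : Int :=
  mergeDist (PySem.List.sorted pc.items (fun e => e.1) false)
    (PySem.List.sorted oc.items (fun e => e.1) false) 0

-- distance_info: B inserts each t_id once (dict items have distinct keys), so dict insert = append — exact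
def coverage_distance_alt (patched_list : List (String × List (String × Int))) (original_list : List (String × List (String × Int))) : List (String × Int) :=
  (pvDictOf patched_list).items.foldl (fun distance_info e =>
    distance_info ++ [(e.1, covDistB e.2 ((pvDictOf original_list).getD e.1 PySem.Dict.empty))]) []

-- ===== PRECONDITION & SPEC =====
-- Pre_ excludes exactly the inputs where Python A raises KeyError: a patched test id absent from original_list
def Pre_coverage_distance (patched_list : List (String × List (String × Int))) (original_list : List (String × List (String × Int))) : Prop :=
  ∀ p ∈ patched_list, ∃ q ∈ original_list, q.1 = p.1
instance (patched_list : List (String × List (String × Int))) (original_list : List (String × List (String × Int))) : Decidable (Pre_coverage_distance patched_list original_list) := by unfold Pre_coverage_distance; infer_instance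

def pvWitness_coverage_distance : (List (String × List (String × Int))) × (List (String × List (String × Int))) :=
  ([("t1", [("e1", 2), ("e2", -1)])], [("t1", [("e2", 5), ("e3", 1)]), ("t2", [])])

def Spec_coverage_distance (patched_list : List (String × List (String × Int))) (original_list : List (String × List (String × Int))) (out : List (String × Int)) : Prop := out = coverage_distance_alt patched_list original_list
instance (patched_list : List (String × List (String × Int))) (original_list : List (String × List (String × Int))) (out : List (String × Int)) : Decidable (Spec_coverage_distance patched_list original_list out) := by unfold Spec_coverage_distance; infer_instance

-- ===== CLAIM (what is proved, stated in full; the proofs are below) =====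
def Claim_equal_coverage_distance : Prop := ∀ (patched_list : List (String × List (String × Int))) (original_list : List (String × List (String × Int))), Dom_coverage_distance patched_list original_list → Pre_coverage_distance patched_list original_list → Spec_coverage_distance patched_list original_list (coverage_distance patched_list original_list)

-- ===== LEMMAS AND PROOFS =====

-- value contributed by a patched item e against the opposite item list
def pvG (qs : List (String × Int)) (e : String × Int) : Int :=
  match qs.find? (fun q => q.1 == e.1) with
  | none => e.2
  | some q => |e.2 - q.2|

-- value contributed by an original item e against the opposite item list
def pvH (ps : List (String × Int)) (e : String × Int) : Int :=
  if ps.any (fun p => p.1 == e.1) then 0 else e.2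

-- the merge scan on strictly key-sorted lists totals the two per-side sums
theorem pv_mergeDist_eq (ps qs : List (String × Int)) (acc : Int)
    (hp : ps.Pairwise (fun a b => a.1 < b.1)) (hq : qs.Pairwise (fun a b => a.1 < b.1)) :
    mergeDist ps qs acc = acc + (ps.map (pvG qs)).sum + (qs.map (pvH ps)).sum := by
  fun_induction mergeDist ps qs acc with
  | case1 qs acc =>
    rw [PySem.List.foldl_add]
    have : ∀ e ∈ qs, pvH [] e = e.2 := by intro e _; simp [pvH]
    rw [List.map_congr_left this]
    simp
  | case2 p ps acc =>
    rw [PySem.List.foldl_add]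
    have : ∀ e ∈ p :: ps, pvG [] e = e.2 := by intro e _; simp [pvG]
    rw [List.map_congr_left this]
    simp
  | case3 p ps q qs acc heq ih =>
    rw [ih (List.pairwise_cons.mp hp).2 (List.pairwise_cons.mp hq).2]
    have hpg : pvG (q :: qs) p = |p.2 - q.2| := by simp [pvG, heq]
    have hqs : ∀ e ∈ ps, pvG (q :: qs) e = pvG qs e := by
      intro e he
      have : p.1 < e.1 := (List.pairwise_cons.mp hp).1 e he
      have hne : (q.1 == e.1) = false := by simp; intro h; rw [heq, h] at this; exact lt_irrefl _ this
      simp [pvG, hne]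
    have hhq : pvH (p :: ps) q = 0 := by simp [pvH, heq]
    have hhs : ∀ e ∈ qs, pvH (p :: ps) e = pvH ps e := by
      intro e he
      have : q.1 < e.1 := (List.pairwise_cons.mp hq).1 e he
      have hne : (p.1 == e.1) = false := by simp; intro h; rw [← heq, h] at this; exact lt_irrefl _ this
      simp only [pvH, List.any_cons, hne, Bool.false_or]
    simp only [List.map_cons, List.sum_cons, hpg, hhq,
      List.map_congr_left hqs, List.map_congr_left hhs]
    ring
  | case4 p ps q qs acc hne hlt ih =>
    rw [ih (List.pairwise_cons.mp hp).2 hq]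
    have hpg : pvG (q :: qs) p = p.2 := by
      have hn : ((q :: qs).find? (fun e => e.1 == p.1)) = none := by
        rw [List.find?_eq_none]
        intro e he
        simp only [beq_iff_eq]
        rcases List.mem_cons.mp he with rfl | he
        · intro h; rw [h] at hlt; exact lt_irrefl _ hlt
        · have : q.1 < e.1 := (List.pairwise_cons.mp hq).1 e he
          intro h; rw [h] at this; exact lt_asymm hlt this
      simp [pvG, hn]
    have hhs : ∀ e ∈ q :: qs, pvH (p :: ps) e = pvH ps e := by
      intro e he
      have : q.1 ≤ e.1 := by
        rcases List.mem_cons.mp he with rfl | he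
        · exact le_refl _
        · exact le_of_lt ((List.pairwise_cons.mp hq).1 e he)
      have hpe : (p.1 == e.1) = false := by
        simp; intro h; rw [h] at hlt; exact absurd hlt (not_lt.mpr this)
      simp only [pvH, List.any_cons, hpe, Bool.false_or]
    simp only [List.map_cons, List.sum_cons, hpg, List.map_congr_left hhs]
    ring
  | case5 p ps q qs acc hne hnlt ih =>
    have hgt : q.1 < p.1 := by
      rcases lt_trichotomy p.1 q.1 with h | h | h
      · exact absurd h hnlt
      · exact absurd h hne
      · exact h
    rw [ih hp (List.pairwise_cons.mp hq).2]
    have hhq : pvH (p :: ps) q = q.2 := by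
      have : ∀ e ∈ p :: ps, (e.1 == q.1) = false := by
        intro e he
        have : p.1 ≤ e.1 := by
          rcases List.mem_cons.mp he with rfl | he
          · exact le_refl _
          · exact le_of_lt ((List.pairwise_cons.mp hp).1 e he)
        simp; intro h; rw [h] at this; exact absurd hgt (not_lt.mpr this)
      have hnone : ((p :: ps).any fun e => e.1 == q.1) = false := by
        rw [List.any_eq_false]
        intro e hm
        simp only [this e hm, Bool.false_eq_true, not_false_eq_true]
      simp [pvH, hnone]
    have hgs : ∀ e ∈ p :: ps, pvG (q :: qs) e = pvG qs e := by
      intro e he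
      have : p.1 ≤ e.1 := by
        rcases List.mem_cons.mp he with rfl | he
        · exact le_refl _
        · exact le_of_lt ((List.pairwise_cons.mp hp).1 e he)
      have hqe : (q.1 == e.1) = false := by
        simp; intro h; rw [← h] at this; exact absurd hgt (not_lt.mpr this)
      simp [pvG, hqe]
    simp only [List.map_cons, List.sum_cons, hhq, List.map_congr_left hgs]
    ring

-- Σ over a filtered list as an ite-sum
theorem pv_sum_filter_ite (l : List String) (q : String → Bool) (g : String → Int) :
    ((l.filter q).map g).sum = (l.map (fun k => if q k then g k else 0)).sum := by
  induction l with
  | nil => rfl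
  | cons x xs ih =>
    by_cases h : q x = true <;> simp [h, ih]

-- a fold of fresh distinct inserts from the empty dict lists its pairs in order
theorem pv_items_foldl_insert (l : List String) (v : String → Int) (h : l.Nodup) :
    (l.foldl (fun d t => d.insert t (v t)) PySem.Dict.empty).items = l.map (fun t => (t, v t)) := by
  simpa using PySem.Dict.items_foldl_insert_fresh l id v PySem.Dict.empty
    (fun a _ => PySem.Dict.contains_empty a) (by simpa using h)

-- every value stored in pvDictOf has Nodup keys (it is a Dict.ofList); getD with the empty default too
theorem pv_foldl_insert_getD_nodup (l : List (String × List (String × Int)))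
    (d : PySem.Dict String (PySem.Dict String Int))
    (hd : ∀ k, (d.getD k PySem.Dict.empty).keys.Nodup) (k : String) :
    ((l.foldl (fun d p => d.insert p.1 (PySem.Dict.ofList p.2)) d).getD k PySem.Dict.empty).keys.Nodup := by
  induction l generalizing d with
  | nil => exact hd k
  | cons x xs ih =>
    refine ih _ (fun k' => ?_)
    rw [PySem.Dict.getD_insert]
    split
    · exact PySem.Dict.nodup_keys_ofList x.2
    · exact hd k'

theorem pv_getD_keys_nodup (l : List (String × List (String × Int))) (k : String) :
    ((pvDictOf l).getD k PySem.Dict.empty).keys.Nodup := by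
  have h : pvDictOf l
      = l.foldl (fun d p => d.insert p.1 (PySem.Dict.ofList p.2)) PySem.Dict.empty := by
    show (l.map (fun p => (p.1, PySem.Dict.ofList p.2))).foldl
        (fun d p => d.insert p.1 p.2) PySem.Dict.empty = _
    rw [List.foldl_map]
  rw [h]
  exact pv_foldl_insert_getD_nodup l PySem.Dict.empty
    (fun _ => by simp [PySem.Dict.getD_empty, PySem.Dict.keys_empty]) k

-- pvG against any permutation of a nodup-keys dict's items is the dict lookup
theorem pv_g_eq (oc : PySem.Dict String Int) (qs : List (String × Int))
    (hperm : qs.Perm oc.items) (hnd : oc.keys.Nodup) (k : String) (v : Int) :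
    pvG qs (k, v) = if oc.contains k then |v - oc.getD k 0| else v := by
  unfold pvG
  by_cases hc : oc.contains k = true
  · obtain ⟨val, hval⟩ : ∃ val, oc.get? k = some val := by
      have := PySem.Dict.contains_eq_isSome_get? (d := oc) (k := k)
      rw [hc] at this
      exact Option.isSome_iff_exists.mp this.symm
    have hgd : oc.getD k 0 = val := PySem.Dict.getD_of_get?_eq_some oc 0 hval
    have hmem : (k, val) ∈ qs := hperm.mem_iff.mpr (PySem.Dict.mem_items_of_get?_eq_some oc hval)
    have hsome : (qs.find? (fun q => q.1 == k)).isSome := by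
      rw [List.find?_isSome]
      exact ⟨(k, val), hmem, by simp⟩
    obtain ⟨e0, he0⟩ := Option.isSome_iff_exists.mp hsome
    have hk0 : e0.1 = k := by simpa using List.find?_some he0
    have he0m : e0 ∈ oc.items := hperm.mem_iff.mp (List.mem_of_find?_eq_some he0)
    have : oc.get? e0.1 = some e0.2 := PySem.Dict.get?_of_mem_items oc (show (e0.1, e0.2) ∈ oc.items by simpa using he0m) hnd
    rw [hk0, hval] at this
    simp [he0, hc, hgd, ← Option.some_inj.mp this]
  · have hnone : qs.find? (fun q => q.1 == k) = none := by
      rw [List.find?_eq_none]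
      intro q hq
      have hq' : q ∈ oc.items := hperm.mem_iff.mp hq
      have : q.1 ∈ oc.keys := PySem.Dict.mem_keys_of_mem_items oc hq'
      rw [PySem.Dict.contains_eq_decide_mem_keys] at hc
      simp only [decide_eq_true_eq] at hc
      simp only [beq_iff_eq]
      intro he; exact hc (he ▸ this)
    simp [hnone, hc]

-- pvH against any permutation of a dict's items is the membership test
theorem pv_h_eq (pc : PySem.Dict String Int) (ps : List (String × Int))
    (hperm : ps.Perm pc.items) (k : String) (v : Int) :
    pvH ps (k, v) = if pc.contains k then 0 else v := by
  unfold pvH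
  have h : (ps.any (fun p => p.1 == k)) = pc.contains k := by
    rw [PySem.Dict.contains_eq_decide_mem_keys]
    rw [Bool.eq_iff_iff]
    simp only [PySem.Dict.keys, List.mem_map, List.any_eq_true, beq_iff_eq, decide_eq_true_eq]
    constructor
    · rintro ⟨p, hm, he⟩; exact ⟨p, hperm.mem_iff.mp hm, he⟩
    · rintro ⟨p, hm, he⟩; exact ⟨p, hperm.mem_iff.mpr hm, he⟩
  rw [h]

-- the inner loops agree on dicts with Nodup keys
-- a key-sorted permutation of a nodup-keys items list is strictly key-increasing
theorem pv_sorted_strict (d : PySem.Dict String Int) (hnd : d.keys.Nodup) :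
    (PySem.List.sorted d.items (fun e => e.1) false).Pairwise (fun a b => a.1 < b.1) := by
  have hperm : (PySem.List.sorted d.items (fun e => e.1) false).Perm d.items :=
    PySem.List.sorted_perm d.items (fun e => e.1) false
  have hle : (PySem.List.sorted d.items (fun e => e.1) false).Pairwise (fun a b => a.1 ≤ b.1) :=
    PySem.List.sorted_pairwise d.items (fun e => e.1)
  have hnd' : ((PySem.List.sorted d.items (fun e => e.1) false).map (fun e => e.1)).Nodup :=
    ((hperm.map (fun e => e.1)).nodup_iff).mpr (by simpa [PySem.Dict.keys] using hnd)
  rw [List.Nodup, List.pairwise_map] at hnd'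
  exact (hle.and hnd').imp (fun h => lt_of_le_of_ne h.1 h.2)

theorem pv_covDistB_sum (pc oc : PySem.Dict String Int)
    (hP : pc.keys.Nodup) (hO : oc.keys.Nodup) :
    covDistB pc oc
      = (pc.keys.map (fun k => if oc.contains k then |pc.getD k 0 - oc.getD k 0| else pc.getD k 0)).sum
        + (oc.keys.map (fun k => if pc.contains k then 0 else oc.getD k 0)).sum := by
  have hpermP := PySem.List.sorted_perm pc.items (fun e => e.1) false
  have hpermQ := PySem.List.sorted_perm oc.items (fun e => e.1) false
  show mergeDist _ _ 0 = _
  rw [pv_mergeDist_eq _ _ 0 (pv_sorted_strict pc hP) (pv_sorted_strict oc hO), zero_add]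
  congr 1
  · rw [(hpermP.map (pvG (PySem.List.sorted oc.items (fun e => e.1) false))).sum_eq,
      PySem.Dict.items_eq_map_keys pc hP 0, List.map_map]
    refine congrArg _ (List.map_congr_left (fun k _ => ?_))
    exact pv_g_eq oc _ hpermQ hO k (pc.getD k 0)
  · rw [(hpermQ.map (pvH (PySem.List.sorted pc.items (fun e => e.1) false))).sum_eq,
      PySem.Dict.items_eq_map_keys oc hO 0, List.map_map]
    refine congrArg _ (List.map_congr_left (fun k _ => ?_))
    exact pv_h_eq pc _ hpermP k (oc.getD k 0)

theorem pv_covDist_eq (pc oc : PySem.Dict String Int)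
    (hP : pc.keys.Nodup) (hO : oc.keys.Nodup) : covDistA pc oc = covDistB pc oc := by
  set P := pc.keys with hPdef
  set O := oc.keys with hOdef
  set p : String → Int := fun k => pc.getD k 0 with hpdef
  set o : String → Int := fun k => oc.getD k 0 with hodef
  have hmemP : ∀ k, pc.contains k = decide (k ∈ P) := fun k => PySem.Dict.contains_eq_decide_mem_keys pc k
  have hmemO : ∀ k, oc.contains k = decide (k ∈ O) := fun k => PySem.Dict.contains_eq_decide_mem_keys oc k
  -- the A-side edge list
  have hedges : PySem.Set.ofList (O ++ P)
      = O ++ P.filter (fun k => !(PySem.Set.contains O k)) := by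
    rw [PySem.Set.ofList_append, PySem.Set.update_eq_append_filter,
        PySem.Set.ofList_eq_self_of_nodup _ hO, PySem.Set.ofList_eq_self_of_nodup _ hP]
  -- A as a sum
  have hA : covDistA pc oc
      = (O.map (fun k => if pc.contains k then |p k - o k| else o k)).sum
        + ((P.filter (fun k => !(PySem.Set.contains O k))).map
            (fun k => if oc.contains k then |p k - o k| else p k)).sum := by
    show (PySem.Set.ofList (O ++ P)).foldl _ 0 = _
    rw [hedges]
    have hb : (fun (distance : Int) edge =>
        if pc.contains edge then
          if !(oc.contains edge) then distance + pc.getD edge 0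
          else distance + |pc.getD edge 0 - oc.getD edge 0|
        else distance + oc.getD edge 0)
        = fun distance edge => distance
            + (if pc.contains edge then
                (if oc.contains edge then |p edge - o edge| else p edge)
               else o edge) := by
      funext distance edge
      by_cases h1 : pc.contains edge <;> by_cases h2 : oc.contains edge <;> simp [h1, h2, hpdef, hodef]
    rw [hb, PySem.List.foldl_add, zero_add, List.map_append, List.sum_append]
    congr 1
    · refine congrArg _ (List.map_congr_left (fun k hk => ?_))
      have : oc.contains k = true := by rw [hmemO]; simp [hk]
      simp [this]
    · refine congrArg _ (List.map_congr_left (fun k hk => ?_))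
      have hc : pc.contains k = true := by
        rw [hmemP]; simp [(List.mem_filter.mp hk).1]
      simp [hc]
  -- B as the two per-side sums
  have hB : covDistB pc oc
      = (P.map (fun k => if oc.contains k then |p k - o k| else p k)).sum
        + (O.map (fun k => if pc.contains k then 0 else o k)).sum := pv_covDistB_sum pc oc hP hO
  rw [hA, hB]
  -- split the mixed sums into pure pieces
  have hsplit1 : (O.map (fun k => if pc.contains k then |p k - o k| else o k)).sum
      = (O.map (fun k => if pc.contains k then |p k - o k| else 0)).sum
        + (O.map (fun k => if pc.contains k then 0 else o k)).sum := by
    rw [← PySem.List.sum_map_add_int]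
    refine congrArg _ (List.map_congr_left (fun k _ => ?_))
    by_cases h : pc.contains k <;> simp [h]
  have hsplit2 : (P.map (fun k => if oc.contains k then |p k - o k| else p k)).sum
      = (P.map (fun k => if oc.contains k then |p k - o k| else 0)).sum
        + (P.map (fun k => if oc.contains k then 0 else p k)).sum := by
    rw [← PySem.List.sum_map_add_int]
    refine congrArg _ (List.map_congr_left (fun k _ => ?_))
    by_cases h : oc.contains k <;> simp [h]
  -- the filtered P-sum is an ite-sum
  have hfilt : ((P.filter (fun k => !(PySem.Set.contains O k))).map
        (fun k => if oc.contains k then |p k - o k| else p k)).sum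
      = (P.map (fun k => if oc.contains k then 0 else p k)).sum := by
    rw [pv_sum_filter_ite]
    refine congrArg _ (List.map_congr_left (fun k _ => ?_))
    by_cases h : k ∈ O
    · have h1 : PySem.Set.contains O k = true := (PySem.Set.contains_iff O k).mpr h
      have h2 : oc.contains k = true := by rw [hmemO]; simp [h]
      simp only [h1, h2]
      simp
    · have h1 : PySem.Set.contains O k = false :=
        Bool.eq_false_iff.mpr (fun ht => h ((PySem.Set.contains_iff O k).mp ht))
      have h2 : oc.contains k = false := by rw [hmemO]; simp [h]
      simp only [h1, h2]
      simp
  -- the two abs-sums range over the same set of keys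
  have habs : (O.map (fun k => if pc.contains k then |p k - o k| else 0)).sum
      = (P.map (fun k => if oc.contains k then |p k - o k| else 0)).sum := by
    have e1 : (O.map (fun k => if pc.contains k then |p k - o k| else 0)).sum
        = ((O.filter (fun k => pc.contains k)).map (fun k => |p k - o k|)).sum := by
      rw [pv_sum_filter_ite]
    have e2 : (P.map (fun k => if oc.contains k then |p k - o k| else 0)).sum
        = ((P.filter (fun k => oc.contains k)).map (fun k => |p k - o k|)).sum := by
      rw [pv_sum_filter_ite]
    rw [e1, e2]
    have hperm : (O.filter (fun k => pc.contains k)).Perm (P.filter (fun k => oc.contains k)) := by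
      refine (List.perm_ext_iff_of_nodup (hO.filter _) (hP.filter _)).mpr (fun k => ?_)
      simp only [List.mem_filter, hmemP, hmemO, decide_eq_true_eq]
      tauto
    exact (hperm.map _).sum_eq
  rw [hsplit1, hsplit2, hfilt, habs]
  ring

-- ===== VERDICT (by name: the statement is the Claim_ definition above) =====
theorem coverage_distance_spec : Claim_equal_coverage_distance := by
  intro pl ol _ _
  show coverage_distance pl ol = coverage_distance_alt pl ol
  unfold coverage_distance coverage_distance_alt
  have hkeys : (pvDictOf pl).keys.Nodup := PySem.Dict.nodup_keys_ofList _
  rw [pv_items_foldl_insert (pvDictOf pl).keys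
        (fun t => covDistA ((pvDictOf pl).getD t PySem.Dict.empty)
          ((pvDictOf ol).getD t PySem.Dict.empty)) hkeys,
      PySem.List.foldl_append_singleton_eq_map
        (fun e => (e.1, covDistB e.2 ((pvDictOf ol).getD e.1 PySem.Dict.empty)))
        (pvDictOf pl).items [],
      PySem.Dict.items_eq_map_keys (pvDictOf pl) hkeys PySem.Dict.empty]
  simp only [List.map_map, List.nil_append]
  refine List.map_congr_left (fun t _ => ?_)
  simp only [Function.comp_apply]
  exact congrArg _ (pv_covDist_eq _ _ (pv_getD_keys_nodup pl t) (pv_getD_keys_nodup ol t))
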